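-- pv_equiv track=rewrite | github.com/allenai/PathNet | pathnet/pathfinder/util.py | get_all_ents
-- ===== SOURCE A (Python) =====
-- from typing import List, Dict, Any, Tuple
-- import string
--
-- PUNKT_SET = set(string.punctuation)
--
-- VALIDNE_TAGS = ['PRODUCT', 'NORP', 'WORK_OF_ART',
--                 'LANGUAGE', 'LOC', 'GPE', 'PERSON',
--                 'FAC', 'ORG', 'EVENT']
--
-- VALIDPOS_TAGS = ['NN', 'NNP', 'NNPS', 'NNS']
--
-- def get_all_ents(cwn: List[List[str]], cne: List[List[str]],
--                  cwp: List[List[str]], cpo: List[List[str]],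
--                  neidxs: List[int], poidxs: List[int]) -> List[Tuple[int, str]]:
--     """
--     pick entities based on NER and POS tags
--     :param cwn: clustered words based on NER
--     :param cne: clustered NER
--     :param cwp: clustered words based on POS
--     :param cpo: clustered POS
--     :param neidxs: start indices for NER clusters
--     :param poidxs: start indices for POS clusters
--     :return: set of other entities
--     """
--     entset = []
--     for ne in VALIDNE_TAGS:
--         for idx in range(len(cne)):
--             if ne in cne[idx]:
--                 entset.append((neidxs[idx], cwn[idx]))
--
--     for pos in VALIDPOS_TAGS:
--         for idx in range(len(cpo)):
--             if pos in cpo[idx]: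
--                 entset.append((poidxs[idx], cwp[idx]))
--     entset = set([(e[0], ' '.join(e[1])) for e in entset])
--     uniq_entset = []
--     for e in entset:
--         if e not in uniq_entset:
--             uniq_entset.append(e)
--     uniq_entset = filter_trailing_puncts(uniq_entset)
--     return uniq_entset
--
-- def filter_trailing_puncts(entity_list: List[Tuple[int, str]]):
--     """
--     filtering based on trailing punctuations
--     :param entity_list: [(0, word1), (10, word2), ...]
--     :return:
--     """
--     new_ent_list = []
--     for eidx, e in enumerate(entity_list):
--         e_toks = e[1].split(' ')
--         if len(e_toks) == 1 and e_toks[0] in PUNKT_SET: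
--             continue
--         else:
--             if e_toks[0] in PUNKT_SET and e_toks[-1] in PUNKT_SET:
--                 new_ent_list.append((e[0] + 1, ' '.join(e_toks[1:-1])))
--             elif e_toks[0] in PUNKT_SET:
--                 new_ent_list.append((e[0] + 1, ' '.join(e_toks[1:])))
--             else:
--                 new_ent_list.append(e)
--     return new_ent_list
-- ===== SOURCE B (Python) =====
-- from typing import List, Tuple
-- import string
--
-- PUNKT_SET = set(string.punctuation)
--
-- VALIDNE_SET = {'PRODUCT', 'NORP', 'WORK_OF_ART',
--                'LANGUAGE', 'LOC', 'GPE', 'PERSON',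
--                'FAC', 'ORG', 'EVENT'}
--
-- VALIDPOS_SET = {'NN', 'NNP', 'NNPS', 'NNS'}
--
--
-- def filter_trailing_puncts(entity_list: List[Tuple[int, str]]):
--     new_ent_list = []
--     for eidx, e in enumerate(entity_list):
--         e_toks = e[1].split(' ')
--         if len(e_toks) == 1 and e_toks[0] in PUNKT_SET:
--             continue
--         else:
--             if e_toks[0] in PUNKT_SET and e_toks[-1] in PUNKT_SET:
--                 new_ent_list.append((e[0] + 1, ' '.join(e_toks[1:-1])))
--             elif e_toks[0] in PUNKT_SET:
--                 new_ent_list.append((e[0] + 1, ' '.join(e_toks[1:])))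
--             else:
--                 new_ent_list.append(e)
--     return new_ent_list
--
--
-- def get_all_ents(cwn: List[List[str]], cne: List[List[str]],
--                  cwp: List[List[str]], cpo: List[List[str]],
--                  neidxs: List[int], poidxs: List[int]) -> List[Tuple[int, str]]:
--     # one pass per cluster list with a tag-set test, then a sorted
--     # deterministic materialisation of the entity set
--     ents = set()
--     for i, tags in enumerate(cne):
--         if any(t in VALIDNE_SET for t in tags):
--             ents.add((neidxs[i], ' '.join(cwn[i])))
--     for i, tags in enumerate(cpo):
--         if any(t in VALIDPOS_SET for t in tags):
--             ents.add((poidxs[i], ' '.join(cwp[i])))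
--     return filter_trailing_puncts(sorted(ents))
-- ===== Notes on version B (the rewrite author's own statement) =====
-- stated objective: simpler
-- what changed: B replaces A's ten tag-major rescans of the clusters, its intermediate duplicate-bearing list and its list-membership dedup loop with a single pass per cluster list testing the tags against a set, deduplicating directly in a set and materialising it in sorted order (A's output order is Python's unspecified set-iteration order; outputs are compared as sets).
import Mathlib
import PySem

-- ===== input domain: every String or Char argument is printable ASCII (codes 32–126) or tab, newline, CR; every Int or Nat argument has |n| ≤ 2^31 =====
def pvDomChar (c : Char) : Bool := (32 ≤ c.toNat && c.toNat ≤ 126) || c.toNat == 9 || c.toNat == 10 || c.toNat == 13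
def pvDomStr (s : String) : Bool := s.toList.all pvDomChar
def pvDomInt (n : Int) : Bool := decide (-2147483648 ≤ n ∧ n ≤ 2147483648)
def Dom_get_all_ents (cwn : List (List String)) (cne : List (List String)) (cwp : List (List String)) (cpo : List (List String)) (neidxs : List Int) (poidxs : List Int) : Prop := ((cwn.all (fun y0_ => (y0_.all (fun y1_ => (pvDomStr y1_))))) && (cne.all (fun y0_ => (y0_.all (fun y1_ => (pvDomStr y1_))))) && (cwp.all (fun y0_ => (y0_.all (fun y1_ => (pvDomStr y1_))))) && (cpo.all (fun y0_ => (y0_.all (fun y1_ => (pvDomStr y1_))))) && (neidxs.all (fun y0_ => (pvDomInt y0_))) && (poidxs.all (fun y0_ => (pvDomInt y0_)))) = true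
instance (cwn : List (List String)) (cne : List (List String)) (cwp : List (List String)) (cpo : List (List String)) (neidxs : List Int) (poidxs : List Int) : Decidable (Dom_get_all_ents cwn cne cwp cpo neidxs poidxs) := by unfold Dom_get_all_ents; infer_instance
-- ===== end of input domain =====

-- B: one pass per cluster list with a direct valid-tag test and a set, materialised in
-- sorted order, instead of A's ten tag-major rescans plus an explicit list-dedup loop.
-- Python's set iteration order is unspecified (hash-randomised), so both ports
-- canonicalise the iteration over the entity set as Python's sorted order; the
-- function's outputs are compared as sets.

-- ===== PORT A =====
def pvValidNeTags : List String :=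
  ["PRODUCT", "NORP", "WORK_OF_ART", "LANGUAGE", "LOC", "GPE", "PERSON", "FAC", "ORG", "EVENT"]

def pvValidPosTags : List String := ["NN", "NNP", "NNPS", "NNS"]

-- PUNKT_SET = set(string.punctuation); membership of a token string is exact as a set test
def pvPunkt : List String :=
  ["!","\"","#","$","%","&","'","(",")","*","+",",","-",".","/",":",";","<","=",">","?","@","[","\\","]","^","_","`","{","|","}","~"]

-- filter_trailing_puncts, shared verbatim by both Python versions
def pvFilterTrailingPuncts (entityList : List (Int × String)) : List (Int × String) :=
  entityList.foldl (fun out e =>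
    let eToks := (PySem.Str.split? e.2 " ").getD []   -- sep = " " ≠ "", always some
    if eToks.length == 1 && pvPunkt.contains (eToks.headD "") then out
    else if pvPunkt.contains (eToks.headD "") && pvPunkt.contains (eToks.getLastD "") then
      out ++ [(e.1 + 1, PySem.Str.join " " (PySem.List.slice eToks (some 1) (some (-1))))]
    else if pvPunkt.contains (eToks.headD "") then
      out ++ [(e.1 + 1, PySem.Str.join " " (PySem.List.slice eToks (some 1) none))]
    else out ++ [e]) []

def get_all_ents (cwn : List (List String)) (cne : List (List String)) (cwp : List (List String)) (cpo : List (List String)) (neidxs : List Int) (poidxs : List Int) : List (Int × String) :=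
  -- for ne in VALIDNE_TAGS: for idx in range(len(cne)): if ne in cne[idx]: append
  let ent1 : List (Int × List String) := pvValidNeTags.foldl (fun acc ne =>
    (PySem.List.pyRange 0 (cne.length : Int) 1).foldl (fun a idx =>
      if (PySem.List.pyGetD cne idx []).contains ne then
        a ++ [(PySem.List.pyGetD neidxs idx 0, PySem.List.pyGetD cwn idx [])]
      else a) acc) []
  -- for pos in VALIDPOS_TAGS: for idx in range(len(cpo)): if pos in cpo[idx]: append
  let ent2 : List (Int × List String) := pvValidPosTags.foldl (fun acc pos =>
    (PySem.List.pyRange 0 (cpo.length : Int) 1).foldl (fun a idx =>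
      if (PySem.List.pyGetD cpo idx []).contains pos then
        a ++ [(PySem.List.pyGetD poidxs idx 0, PySem.List.pyGetD cwp idx [])]
      else a) acc) ent1
  -- entset = set([(e[0], ' '.join(e[1])) for e in entset])
  let entset : PySem.Set (Int × String) :=
    PySem.Set.ofList (ent2.map (fun e => (e.1, PySem.Str.join " " e.2)))
  -- 'for e in entset': the set's iteration order is unspecified; canonicalised as sorted order
  let iter : List (Int × String) := PySem.List.sorted2 entset (fun e => e.1) (fun e => e.2) false
  -- uniq_entset dedup loop (a no-op on a set's elements)
  let uniq : List (Int × String) :=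
    iter.foldl (fun u e => if u.contains e then u else u ++ [e]) []
  pvFilterTrailingPuncts uniq

-- ===== PORT B =====
def get_all_ents_alt (cwn : List (List String)) (cne : List (List String)) (cwp : List (List String)) (cpo : List (List String)) (neidxs : List Int) (poidxs : List Int) : List (Int × String) :=
  -- for i, tags in enumerate(cne): if any(t in VALIDNE_SET for t in tags): ents.add(...)
  let s1 : PySem.Set (Int × String) := (PySem.List.enumerate cne 0).foldl (fun s p =>
    if p.2.any (fun t => pvValidNeTags.contains t) then
      PySem.Set.add s (PySem.List.pyGetD neidxs p.1 0, PySem.Str.join " " (PySem.List.pyGetD cwn p.1 []))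
    else s) PySem.Set.empty
  -- for i, tags in enumerate(cpo): if any(t in VALIDPOS_SET for t in tags): ents.add(...)
  let s2 : PySem.Set (Int × String) := (PySem.List.enumerate cpo 0).foldl (fun s p =>
    if p.2.any (fun t => pvValidPosTags.contains t) then
      PySem.Set.add s (PySem.List.pyGetD poidxs p.1 0, PySem.Str.join " " (PySem.List.pyGetD cwp p.1 []))
    else s) s1
  -- sorted(ents): Python sorts the (int, str) tuples lexicographically
  pvFilterTrailingPuncts (PySem.List.sorted2 s2 (fun e => e.1) (fun e => e.2) false)

-- ===== PRECONDITION & SPEC =====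
-- Pre_ excludes exactly the inputs on which A raises IndexError: some cluster with a valid
-- tag whose index is out of range for the parallel start-index/word lists (B raises there too).
def Pre_get_all_ents (cwn : List (List String)) (cne : List (List String)) (cwp : List (List String)) (cpo : List (List String)) (neidxs : List Int) (poidxs : List Int) : Prop :=
  (∀ i, i < cne.length → (∃ t ∈ pvValidNeTags, t ∈ cne.getD i []) → (i < neidxs.length ∧ i < cwn.length)) ∧
  (∀ i, i < cpo.length → (∃ t ∈ pvValidPosTags, t ∈ cpo.getD i []) → (i < poidxs.length ∧ i < cwp.length))
instance (cwn : List (List String)) (cne : List (List String)) (cwp : List (List String)) (cpo : List (List String)) (neidxs : List Int) (poidxs : List Int) : Decidable (Pre_get_all_ents cwn cne cwp cpo neidxs poidxs) := by unfold Pre_get_all_ents; infer_instance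

def pvWitness_get_all_ents : List (List String) × List (List String) × List (List String) × List (List String) × List Int × List Int :=
  ([["Paris"]], [["GPE"]], [["dog"]], [["NN"]], [0], [3])

def Spec_get_all_ents (cwn : List (List String)) (cne : List (List String)) (cwp : List (List String)) (cpo : List (List String)) (neidxs : List Int) (poidxs : List Int) (out : List (Int × String)) : Prop := out = get_all_ents_alt cwn cne cwp cpo neidxs poidxs
instance (cwn : List (List String)) (cne : List (List String)) (cwp : List (List String)) (cpo : List (List String)) (neidxs : List Int) (poidxs : List Int) (out : List (Int × String)) : Decidable (Spec_get_all_ents cwn cne cwp cpo neidxs poidxs out) := by unfold Spec_get_all_ents; infer_instance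

-- ===== CLAIM (what is proved, stated in full; the proofs are below) =====
def Claim_equal_get_all_ents : Prop := ∀ (cwn : List (List String)) (cne : List (List String)) (cwp : List (List String)) (cpo : List (List String)) (neidxs : List Int) (poidxs : List Int), Dom_get_all_ents cwn cne cwp cpo neidxs poidxs → Pre_get_all_ents cwn cne cwp cpo neidxs poidxs → Spec_get_all_ents cwn cne cwp cpo neidxs poidxs (get_all_ents cwn cne cwp cpo neidxs poidxs)

-- ===== LEMMAS AND PROOFS =====

-- sorted2 on (Int × String) pairs is sorted with the lexicographic key
theorem pv_sorted2_eq_sorted_lex (xs : List (Int × String)) :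
    PySem.List.sorted2 xs (fun e => e.1) (fun e => e.2) false
      = PySem.List.sorted xs (fun x => toLex (x.1, x.2)) false := by
  unfold PySem.List.sorted2 PySem.List.sorted
  simp only [if_neg (by decide : ¬ (false = true))]
  have hbe : (fun (a b : Int × String) => decide (a.1 < b.1) || (!decide (b.1 < a.1) && decide (a.2 < b.2)))
      = (fun (a b : Int × String) => decide (toLex (a.1, a.2) < toLex (b.1, b.2))) := by
    funext a b
    rcases lt_trichotomy a.1 b.1 with h | h | h
    · simp [Prod.Lex.lt_iff, h, asymm h]
    · simp [Prod.Lex.lt_iff, h]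
    · simp [Prod.Lex.lt_iff, h, asymm h, ne_of_gt h]
  rw [hbe]

-- sorted2 of two permuted duplicate-free pair lists agree
theorem pv_sorted2_congr_perm (xs ys : List (Int × String)) (hp : xs.Perm ys) :
    PySem.List.sorted2 xs (fun e => e.1) (fun e => e.2) false
      = PySem.List.sorted2 ys (fun e => e.1) (fun e => e.2) false := by
  rw [pv_sorted2_eq_sorted_lex, pv_sorted2_eq_sorted_lex]
  refine PySem.List.sorted_eq_sorted_of_perm _ _ _ ?_ hp
  intro a b h
  have : (a.1, a.2) = (b.1, b.2) := toLex.injective h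
  simpa using this

-- the 'uniq' dedup loop is the identity on a duplicate-free list
theorem pv_dedup_fold_nodup (l acc : List (Int × String)) (h : (acc ++ l).Nodup) :
    l.foldl (fun u e => if u.contains e then u else u ++ [e]) acc = acc ++ l := by
  induction l generalizing acc with
  | nil => simp
  | cons e t ih =>
    have he : e ∉ acc := by
      intro hmem
      exact (List.disjoint_of_nodup_append h) hmem (by simp)
    have hc : acc.contains e = false := by
      simpa using he
    simp only [List.foldl_cons, hc]
    have h' : ((acc ++ [e]) ++ t).Nodup := by
      simpa using h
    rw [if_neg (by simp), ih (acc ++ [e]) h']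
    simp

-- membership and nodup of the conditional Set.add accumulation loop
theorem pv_mem_foldl_add_if {α β : Type} [BEq β] [LawfulBEq β]
    (l : List α) (q : α → Bool) (v : α → β) (s0 : PySem.Set β) (y : β) :
    y ∈ l.foldl (fun s p => if q p then PySem.Set.add s (v p) else s) s0
      ↔ y ∈ s0 ∨ ∃ p ∈ l, q p ∧ y = v p := by
  induction l generalizing s0 with
  | nil => simp
  | cons a t ih =>
    by_cases hq : q a
    · simp only [List.foldl_cons, hq, if_pos]
      rw [ih]
      simp only [PySem.Set.mem_add, List.mem_cons]
      constructor
      · rintro (⟨h1 | h1⟩ | h1)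
        · exact Or.inl h1
        · exact Or.inr ⟨a, Or.inl rfl, hq, h1⟩
        · obtain ⟨p, hp, hqp, hy⟩ := h1; exact Or.inr ⟨p, Or.inr hp, hqp, hy⟩
      · rintro (h1 | ⟨p, (rfl | hp), hqp, hy⟩)
        · exact Or.inl (Or.inl h1)
        · exact Or.inl (Or.inr hy)
        · exact Or.inr ⟨p, hp, hqp, hy⟩
    · simp only [List.foldl_cons, hq]
      rw [if_neg (by simp), ih]
      constructor
      · rintro (h1 | ⟨p, hp, hqp, hy⟩)
        · exact Or.inl h1
        · exact Or.inr ⟨p, List.mem_cons_of_mem _ hp, hqp, hy⟩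
      · rintro (h1 | ⟨p, hp, hqp, hy⟩)
        · exact Or.inl h1
        · rcases List.mem_cons.mp hp with rfl | hp'
          · exact absurd hqp hq
          · exact Or.inr ⟨p, hp', hqp, hy⟩

theorem pv_nodup_foldl_add_if {α β : Type} [BEq β] [LawfulBEq β]
    (l : List α) (q : α → Bool) (v : α → β) (s0 : PySem.Set β) (h : List.Nodup s0) :
    List.Nodup (l.foldl (fun s p => if q p then PySem.Set.add s (v p) else s) s0) := by
  induction l generalizing s0 with
  | nil => simpa
  | cons a t ih =>
    by_cases hq : q a
    · simp only [List.foldl_cons, hq, if_pos]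
      exact ih _ (PySem.Set.nodup_add _ _ h)
    · simp only [List.foldl_cons, hq]
      rw [if_neg (by simp)]
      exact ih _ h

-- membership of one section of A's tag-major flatMap equals membership of B's one-pass filter
theorem pv_section_mem (tags : List String) (cl : List (List String)) (idxs : List Int)
    (words : List (List String)) (y : Int × String) :
    (y ∈ (tags.flatMap (fun ne =>
        ((PySem.List.pyRange 0 (cl.length : Int) 1).filter
            (fun idx => (PySem.List.pyGetD cl idx []).contains ne)).map
          (fun idx => (PySem.List.pyGetD idxs idx 0, PySem.List.pyGetD words idx [])))).map
        (fun e => (e.1, PySem.Str.join " " e.2)))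
      ↔ ∃ p ∈ PySem.List.enumerate cl 0, p.2.any (fun t => tags.contains t)
          ∧ y = (PySem.List.pyGetD idxs p.1 0, PySem.Str.join " " (PySem.List.pyGetD words p.1 [])) := by
  simp only [List.mem_map, List.mem_flatMap, List.mem_filter, PySem.List.mem_pyRange_one,
    PySem.List.mem_enumerate_iff, List.any_eq_true, List.contains_iff_mem]
  constructor
  · rintro ⟨e, ⟨ne, hne, idx, ⟨⟨h0, hlt⟩, hcont⟩, rfl⟩, rfl⟩
    have hk : idx = ((idx.toNat : Nat) : Int) := by omega
    have hklt : idx.toNat < cl.length := by omega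
    rw [hk, PySem.List.pyGetD_natCast, List.getD_eq_getElem _ _ hklt] at hcont
    refine ⟨(0 + (idx.toNat : Int), cl[idx.toNat]), ⟨idx.toNat, hklt, rfl⟩,
      ⟨ne, hcont, hne⟩, ?_⟩
    simp only [zero_add, ← hk]
  · rintro ⟨p, ⟨k, hklt, rfl⟩, ⟨t, htmem, htags⟩, rfl⟩
    refine ⟨(PySem.List.pyGetD idxs (0 + (k : Int)) 0, PySem.List.pyGetD words (0 + (k : Int)) []),
      ⟨t, htags, 0 + (k : Int), ⟨⟨by omega, by omega⟩, ?_⟩, rfl⟩, rfl⟩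
    simp only [zero_add, PySem.List.pyGetD_natCast, List.getD_eq_getElem _ _ hklt]
    exact htmem

-- ===== VERDICT (by name: the statement is the Claim_ definition above) =====
set_option maxHeartbeats 1000000 in
theorem get_all_ents_spec : Claim_equal_get_all_ents := by
  intro cwn cne cwp cpo neidxs poidxs _dom _pre
  unfold Spec_get_all_ents get_all_ents get_all_ents_alt
  simp only [PySem.List.foldl_append_if, PySem.List.foldl_append_eq_flatMap, List.nil_append]
  set LAm := ((pvValidNeTags.flatMap (fun ne =>
      ((PySem.List.pyRange 0 (cne.length : Int) 1).filter
          (fun idx => (PySem.List.pyGetD cne idx []).contains ne)).map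
        (fun idx => (PySem.List.pyGetD neidxs idx 0, PySem.List.pyGetD cwn idx []))))
    ++ (pvValidPosTags.flatMap (fun pos =>
      ((PySem.List.pyRange 0 (cpo.length : Int) 1).filter
          (fun idx => (PySem.List.pyGetD cpo idx []).contains pos)).map
        (fun idx => (PySem.List.pyGetD poidxs idx 0, PySem.List.pyGetD cwp idx []))))).map
      (fun e => (e.1, PySem.Str.join " " e.2)) with hLAm
  have hnodupA : (PySem.Set.ofList LAm : List (Int × String)).Nodup := PySem.Set.nodup_ofList LAm
  have hiter : (PySem.List.sorted2 (PySem.Set.ofList LAm) (fun e => e.1) (fun e => e.2) false).Nodup :=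
    (PySem.List.sorted2_perm _ _ _ _).symm.nodup hnodupA
  rw [pv_dedup_fold_nodup _ [] (by simpa using hiter), List.nil_append]
  congr 1
  apply pv_sorted2_congr_perm
  have hnodupS : (List.foldl
      (fun s p =>
        if (p.2.any fun t => pvValidPosTags.contains t) = true then
          PySem.Set.add s (PySem.List.pyGetD poidxs p.1 0, PySem.Str.join " " (PySem.List.pyGetD cwp p.1 []))
        else s)
      (List.foldl
        (fun s p =>
          if (p.2.any fun t => pvValidNeTags.contains t) = true then
            PySem.Set.add s (PySem.List.pyGetD neidxs p.1 0, PySem.Str.join " " (PySem.List.pyGetD cwn p.1 []))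
          else s)
        PySem.Set.empty (PySem.List.enumerate cne))
      (PySem.List.enumerate cpo)).Nodup :=
    pv_nodup_foldl_add_if _ _ _ _ (pv_nodup_foldl_add_if _ _ _ _ (by simp [PySem.Set.empty]))
  rw [List.perm_ext_iff_of_nodup hnodupA hnodupS]
  intro y
  rw [PySem.Set.mem_ofList, pv_mem_foldl_add_if, pv_mem_foldl_add_if, hLAm]
  simp only [List.map_append, List.mem_append, pv_section_mem]
  have hempty : y ∉ (PySem.Set.empty : PySem.Set (Int × String)) := by
    simp [PySem.Set.empty]
  rw [or_iff_right hempty]
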